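-- pv_equiv track=rewrite | github.com/herochkanya/Administrator_tg_bot | Odoroblo/app/handlers.py | result_text
-- ===== SOURCE A (Python) =====
-- def result_text(field):
--     text = ''
--     string = ''
--     count = 0
--     for i in field.values():
--         string += i
--         count += 1
--         if count == 3:
--             text += string + '\n'
--             string = ''
--             count = 0
--     return text
-- ===== SOURCE B (Python) =====
-- def result_text(field):
--     vals = list(field.values())
--     parts = []
--     i = 0
--     while i + 3 <= len(vals):
--         parts.append(vals[i] + vals[i + 1] + vals[i + 2] + '\n')
--         i += 3
--     return ''.join(parts)
-- ===== Notes on version B (the rewrite author's own statement) =====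
-- stated objective: alternative
-- what changed: Replaces A's running-string/count==3 accumulator loop with index-based chunking: materialize the values, append one part per complete triple while i+3 <= len, and join the parts at the end; the trailing partial group is dropped by the loop guard instead of by never flushing.
import Mathlib
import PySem

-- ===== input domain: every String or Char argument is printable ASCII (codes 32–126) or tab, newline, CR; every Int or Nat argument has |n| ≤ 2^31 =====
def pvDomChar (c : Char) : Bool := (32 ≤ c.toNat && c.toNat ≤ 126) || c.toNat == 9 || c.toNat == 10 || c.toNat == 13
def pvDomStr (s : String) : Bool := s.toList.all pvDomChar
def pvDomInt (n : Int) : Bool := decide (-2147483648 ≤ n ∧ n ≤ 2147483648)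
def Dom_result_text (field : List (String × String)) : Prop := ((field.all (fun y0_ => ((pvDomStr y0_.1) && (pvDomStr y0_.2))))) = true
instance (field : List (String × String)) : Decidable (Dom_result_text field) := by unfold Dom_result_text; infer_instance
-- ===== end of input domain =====

-- B replaces A's running-string/count==3 accumulator loop with index-based chunking: it materializes the
-- values, collects one part per complete triple (dropping the trailing partial group), and joins at the end (objective: alternative decomposition, same cost).

-- ===== PORT A =====
-- state = (text, string, count), exactly A's three variables
def resultTextStep (s : String × String × Int) (i : String) : String × String × Int :=
  let string := s.2.1 ++ i
  let count := s.2.2 + 1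
  if count == 3 then (s.1 ++ string ++ "\n", "", 0) else (s.1, string, count)

def result_text (field : List (String × String)) : String :=
  (((PySem.Dict.ofList field).values).foldl resultTextStep ("", "", 0)).1

-- ===== PORT B =====
-- the while loop: one part appended per triple, index advancing by 3 (indices are in range by the guard)
def resultTextParts (vals : List String) (i : Nat) : List String :=
  if h : i + 3 ≤ vals.length then
    (vals[i] ++ vals[i + 1] ++ vals[i + 2] ++ "\n") :: resultTextParts vals (i + 3)
  else []
termination_by vals.length - i

def result_text_alt (field : List (String × String)) : String :=
  String.join (resultTextParts ((PySem.Dict.ofList field).values) 0)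

-- ===== PRECONDITION & SPEC =====
def Spec_result_text (field : List (String × String)) (out : String) : Prop := out = result_text_alt field
instance (field : List (String × String)) (out : String) : Decidable (Spec_result_text field out) := by unfold Spec_result_text; infer_instance

-- ===== CLAIM (what is proved, stated in full; the proofs are below) =====
def Claim_equal_result_text : Prop := ∀ (field : List (String × String)), Dom_result_text field → Spec_result_text field (result_text field)

-- ===== LEMMAS AND PROOFS =====
-- proof-only helper: the chunked text as a structural recursion, three elements at a time
def goStr : List String → String
  | a :: b :: c :: rest => a ++ b ++ c ++ "\n" ++ goStr rest
  | _ => ""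

lemma join_foldl_shift (l : List String) : ∀ s : String, l.foldl (· ++ ·) s = s ++ l.foldl (· ++ ·) "" := by
  induction l with
  | nil => intro s; simp
  | cons a t ih => intro s; simp only [List.foldl]; rw [ih (s ++ a), ih ("" ++ a)]; simp [String.append_assoc]

lemma join_cons (a : String) (l : List String) : String.join (a :: l) = a ++ String.join l := by
  simp only [String.join, List.foldl]
  exact join_foldl_shift l ("" ++ a) |>.trans (by simp)

lemma parts_eq_goStr (vals : List String) : ∀ i : Nat, String.join (resultTextParts vals i) = goStr (vals.drop i) := by
  intro i
  induction i using resultTextParts.induct vals with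
  | case1 i h ih =>
    rw [resultTextParts, dif_pos h, join_cons, ih]
    have h0 : vals.drop i = vals[i] :: vals.drop (i + 1) := List.drop_eq_getElem_cons (by omega)
    have h1 : vals.drop (i + 1) = vals[i + 1] :: vals.drop (i + 2) := List.drop_eq_getElem_cons (by omega)
    have h2 : vals.drop (i + 2) = vals[i + 2] :: vals.drop (i + 3) := List.drop_eq_getElem_cons (by omega)
    rw [h0, h1, h2]
    simp [goStr, String.append_assoc]
  | case2 i h =>
    rw [resultTextParts, dif_neg h]
    have hlen : (vals.drop i).length < 3 := by simp; omega
    match hv : vals.drop i, hlen with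
    | [], _ => simp [goStr, String.join]
    | [a], _ => simp [goStr, String.join]
    | [a, b], _ => simp [goStr, String.join]

lemma resultText_loop (vals : List String) :
    ∀ text : String, (vals.foldl resultTextStep (text, "", 0)).1 = text ++ goStr vals := by
  induction vals using goStr.induct with
  | case1 a b c rest ih =>
    intro text
    simp only [List.foldl, resultTextStep, goStr]
    norm_num
    rw [ih]
    simp [String.append_assoc]
  | case2 v h =>
    intro text
    match v with
    | [] => simp [goStr]
    | [a] => simp [List.foldl, resultTextStep, goStr]
    | [a, b] => simp [List.foldl, resultTextStep, goStr]
    | a :: b :: c :: rest => exact absurd rfl (h a b c rest)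

-- ===== VERDICT (by name: the statement is the Claim_ definition above) =====
theorem result_text_spec : Claim_equal_result_text := by
  intro field _
  unfold Spec_result_text result_text result_text_alt
  rw [resultText_loop, parts_eq_goStr]
  simp
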